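-- pv_equiv track=rewrite | github.com/cyrillOCR/Feature-Extraction | modules/means/mean_square_horizontal_vertical.py | suma_vertical
-- ===== SOURCE A (Python) =====
-- def suma_vertical(image):
--     suma=0
--     height=len(image)
--     width=len(image[0])
--     for i in range(0,width): #coloane
--         for j in range(0,height): #linii
--              if(image[j][i]>200):
--                 for k in range(j+1,height):
--                     if image[k][i]>200:
--                         suma=suma+k-j
--                         break
--     return suma
-- ===== SOURCE B (Python) =====
-- def suma_vertical(image):
--     total = 0
--     height = len(image)
--     width = len(image[0])
--     for i in range(width):
--         first = -1
--         last = -1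
--         for j in range(height):
--             if image[j][i] > 200:
--                 if first < 0:
--                     first = j
--                 last = j
--         if first >= 0:
--             total += last - first
--     return total
-- ===== Notes on version B (the rewrite author's own statement) =====
-- stated objective: faster
-- what changed: Per column A scans forward from every white pixel to find the next white pixel (gap sum); B makes one pass per column tracking first and last white rows and adds last-first, the telescoped sum of gaps.
import Mathlib
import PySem

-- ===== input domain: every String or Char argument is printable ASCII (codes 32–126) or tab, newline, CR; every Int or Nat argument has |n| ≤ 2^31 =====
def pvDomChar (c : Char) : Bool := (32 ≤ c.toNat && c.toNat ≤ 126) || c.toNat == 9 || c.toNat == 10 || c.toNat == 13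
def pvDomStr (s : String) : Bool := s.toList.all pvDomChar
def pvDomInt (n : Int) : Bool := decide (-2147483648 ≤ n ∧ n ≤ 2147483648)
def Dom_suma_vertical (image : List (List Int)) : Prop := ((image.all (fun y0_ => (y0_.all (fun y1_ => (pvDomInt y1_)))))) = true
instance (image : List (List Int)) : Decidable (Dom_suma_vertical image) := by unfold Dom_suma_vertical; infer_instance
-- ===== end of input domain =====

-- B replaces A's per-white-pixel forward scan for the next white pixel by a single pass per
-- column tracking first and last white rows (the gap sum telescopes to last - first); faster.

-- shared indexing helper: image[j][i] (in range inside Pre_)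
def pvPx (image : List (List Int)) (j i : Int) : Int :=
  (PySem.List.pyGet? ((PySem.List.pyGet? image j).getD []) i).getD 0

-- ===== PORT A =====
def suma_vertical (image : List (List Int)) : Int :=
  let height : Int := image.length
  let width : Int := ((PySem.List.pyGet? image 0).getD []).length
  (PySem.List.pyRange 0 width 1).foldl (fun suma i =>
    (PySem.List.pyRange 0 height 1).foldl (fun s j =>
      if pvPx image j i > 200 then
        -- 'for k in range(j+1,height): if white: suma += k-j; break' = first white k after j
        match (PySem.List.pyRange (j+1) height 1).find? (fun k => pvPx image k i > 200) with
        | some k => s + k - j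
        | none => s
      else s) suma) 0

-- ===== PORT B =====
def suma_vertical_alt (image : List (List Int)) : Int :=
  let height : Int := image.length
  let width : Int := ((PySem.List.pyGet? image 0).getD []).length
  (PySem.List.pyRange 0 width 1).foldl (fun total i =>
    let fl := (PySem.List.pyRange 0 height 1).foldl (fun (p : Int × Int) j =>
      if pvPx image j i > 200 then ((if p.1 < 0 then j else p.1), j) else p) (-1, -1)
    if fl.1 ≥ 0 then total + fl.2 - fl.1 else total) 0

-- ===== PRECONDITION & SPEC =====
-- Pre_ excludes exactly the inputs where Python A raises IndexError: the empty image
-- (image[0]) and images where some row is shorter than row 0 (image[j][i]).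
def Pre_suma_vertical (image : List (List Int)) : Prop :=
  image ≠ [] ∧ ∀ row ∈ image, (image.headD []).length ≤ row.length

instance (image : List (List Int)) : Decidable (Pre_suma_vertical image) := by
  unfold Pre_suma_vertical; infer_instance

def pvWitness_suma_vertical : List (List Int) := [[255, 0], [0, 0], [255, 255]]

def Spec_suma_vertical (image : List (List Int)) (out : Int) : Prop := out = suma_vertical_alt image
instance (image : List (List Int)) (out : Int) : Decidable (Spec_suma_vertical image out) := by unfold Spec_suma_vertical; infer_instance

-- ===== CLAIM (what is proved, stated in full; the proofs are below) =====
def Claim_equal_suma_vertical : Prop := ∀ (image : List (List Int)), Dom_suma_vertical image → Pre_suma_vertical image → Spec_suma_vertical image (suma_vertical image)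

-- ===== LEMMAS AND PROOFS =====

-- A's inner two loops over one column: each white row j contributes (next white row) - j;
-- the total is (last white row) - (first white row).
theorem pvInnerA_eq (p : Int → Prop) [DecidablePred p] (h : Int) :
    ∀ n (a : Int), (h - a).toNat = n → ∀ s : Int,
    (PySem.List.pyRange a h 1).foldl (fun s j =>
        if p j then
          match (PySem.List.pyRange (j+1) h 1).find? (fun k => decide (p k)) with
          | some k => s + k - j
          | none => s
        else s) s
    = s + (match (PySem.List.pyRange a h 1).find? (fun k => decide (p k)) with
           | some j => (((PySem.List.pyRange a h 1).reverse).find? (fun k => decide (p k))).getD 0 - j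
           | none => 0) := by
  intro n
  induction n with
  | zero =>
    intro a ha s
    rw [PySem.List.pyRange_one_eq_nil (by omega)]
    simp
  | succ m ih =>
    intro a ha s
    have hab : a < h := by omega
    rw [PySem.List.pyRange_one_cons hab]
    simp only [List.foldl_cons, List.reverse_cons, List.find?_append]
    by_cases hg : p a
    · rw [if_pos hg]
      rw [List.find?_cons_of_pos (p := fun k => decide (p k)) (by simpa using hg)]
      cases hfw : (PySem.List.pyRange (a+1) h 1).find? (fun k => decide (p k)) with
      | none =>
        have hrev : ((PySem.List.pyRange (a+1) h 1).reverse).find? (fun k => decide (p k)) = none := by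
          rw [List.find?_eq_none] at hfw ⊢
          intro x hx; exact hfw x (List.mem_reverse.mp hx)
        rw [ih (a+1) (by omega) s, hfw, hrev]
        simp [hg]
      | some k =>
        have hex : ∃ x ∈ (PySem.List.pyRange (a+1) h 1).reverse, decide (p x) = true := by
          exact ⟨k, List.mem_reverse.mpr (List.mem_of_find?_eq_some hfw), by have := List.find?_some hfw; simpa using this⟩
        obtain ⟨m', hm'⟩ := Option.isSome_iff_exists.mp (List.find?_isSome.mpr hex)
        rw [ih (a+1) (by omega) (s + k - a), hfw, hm']
        simp only [Option.getD_some, Option.some_or]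
        ring
    · rw [if_neg hg]
      rw [ih (a+1) (by omega) s]
      rw [List.find?_cons_of_neg (p := fun k => decide (p k)) (by simpa using hg)]
      have h1 : List.find? (fun k => decide (p k)) [a] = none := by simp [hg]
      rw [h1]
      cases hrev : ((PySem.List.pyRange (a+1) h 1).reverse).find? (fun k => decide (p k)) <;> simp [Option.or_none]

-- B's inner loop over one column: the (first, last) accumulator ends at the first and last
-- rows satisfying p (with the incoming state as fallback).
theorem pvInnerB_eq (p : Int → Prop) [DecidablePred p] (h : Int) :
    ∀ n (a : Int), 0 ≤ a → (h - a).toNat = n → ∀ q : Int × Int,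
    (PySem.List.pyRange a h 1).foldl (fun (q : Int × Int) j =>
        if p j then ((if q.1 < 0 then j else q.1), j) else q) q
    = ((if q.1 < 0 then ((PySem.List.pyRange a h 1).find? (fun k => decide (p k))).getD q.1 else q.1),
       (((PySem.List.pyRange a h 1).reverse).find? (fun k => decide (p k))).getD q.2) := by
  intro n
  induction n with
  | zero =>
    intro a ha0 ha q
    rw [PySem.List.pyRange_one_eq_nil (by omega)]
    simp
  | succ m ih =>
    intro a ha0 ha q
    have hab : a < h := by omega
    rw [PySem.List.pyRange_one_cons hab]
    simp only [List.foldl_cons, List.reverse_cons, List.find?_append]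
    by_cases hg : p a
    · rw [if_pos hg]
      rw [List.find?_cons_of_pos (p := fun k => decide (p k)) (by simpa using hg)]
      rw [ih (a+1) (by omega) (by omega)]
      have h1 : List.find? (fun k => decide (p k)) [a] = some a := by simp [hg]
      rw [h1]
      cases hrev : ((PySem.List.pyRange (a+1) h 1).reverse).find? (fun k => decide (p k)) with
      | none =>
        simp only [Option.none_or, Option.getD_some]
        by_cases hq : q.1 < 0 <;> simp [hq] <;> omega
      | some m' =>
        simp only [Option.some_or, Option.getD_some]
        by_cases hq : q.1 < 0 <;> simp [hq] <;> omega
    · rw [if_neg hg]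
      rw [ih (a+1) (by omega) (by omega)]
      rw [List.find?_cons_of_neg (p := fun k => decide (p k)) (by simpa using hg)]
      have h1 : List.find? (fun k => decide (p k)) [a] = none := by simp [hg]
      rw [h1]
      cases hrev : ((PySem.List.pyRange (a+1) h 1).reverse).find? (fun k => decide (p k)) <;> simp [Option.or_none]

-- per column, A's contribution equals B's contribution
theorem pvInner_eq (p : Int → Prop) [DecidablePred p] (h : Int) (s : Int) :
    (PySem.List.pyRange 0 h 1).foldl (fun s j =>
        if p j then
          match (PySem.List.pyRange (j+1) h 1).find? (fun k => decide (p k)) with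
          | some k => s + k - j
          | none => s
        else s) s
    = (let fl := (PySem.List.pyRange 0 h 1).foldl (fun (q : Int × Int) j =>
          if p j then ((if q.1 < 0 then j else q.1), j) else q) (-1, -1)
       if fl.1 ≥ 0 then s + fl.2 - fl.1 else s) := by
  rw [pvInnerA_eq p h (h - 0).toNat 0 rfl s, pvInnerB_eq p h (h - 0).toNat 0 le_rfl rfl (-1, -1)]
  cases hfw : (PySem.List.pyRange 0 h 1).find? (fun k => decide (p k)) with
  | none => norm_num
  | some j =>
    have hj : 0 ≤ j := by
      have := List.mem_of_find?_eq_some hfw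
      exact (PySem.List.mem_pyRange_one.mp this).1
    have hex : ∃ x ∈ (PySem.List.pyRange 0 h 1).reverse, decide (p x) = true :=
      ⟨j, List.mem_reverse.mpr (List.mem_of_find?_eq_some hfw), by have := List.find?_some hfw; simpa using this⟩
    obtain ⟨m', hm'⟩ := Option.isSome_iff_exists.mp (List.find?_isSome.mpr hex)
    rw [hm']
    simp only [Option.getD_some]
    split_ifs <;> linarith

-- ===== VERDICT (by name: the statement is the Claim_ definition above) =====
theorem suma_vertical_spec : Claim_equal_suma_vertical := by
  intro image _ _
  unfold Spec_suma_vertical suma_vertical suma_vertical_alt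
  simp only []
  congr 1
  funext s i
  exact pvInner_eq (fun j => pvPx image j i > 200) (image.length : Int) s
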